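-- pv_equiv track=rewrite | github.com/limonspb/freedom-spec-experiments | find_step.py | find_step_up_index
-- ===== SOURCE A (Python) =====
-- def find_step_up_index(data, step_number):
--     index = 0
--     current_step_number = 0
--     is_currently_up = False
--
--     for value in data:
--         if value > 1500 and not is_currently_up:
--             is_currently_up = True
--             if current_step_number == step_number:
--                 break
--             else:
--                 current_step_number += 1
--
--         if value < 1500:
--             is_currently_up = False
--
--         index += 1
--
--     return index
-- ===== SOURCE B (Python) =====
-- def find_step_up_index(data, step_number):
--     # Significant samples: values exactly at the 1500 threshold never change the
--     # up/down state, so drop them; what remains alternates freely above/below.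
--     sig = [(i, v) for i, v in enumerate(data) if v != 1500]
--     # An up-crossing is a >1500 significant sample whose previous significant
--     # sample is <1500 (or which has no predecessor): a purely local, adjacent-pair
--     # criterion on the filtered sequence -- no running state flag needed.
--     prevs = [None] + [v for _, v in sig]
--     crossings = [i for p, (i, v) in zip(prevs, sig)
--                  if v > 1500 and (p is None or p < 1500)]
--     if 0 <= step_number < len(crossings):
--         return crossings[step_number]
--     return len(data)
-- ===== Notes on version B (the rewrite author's own statement) =====
-- stated objective: alternative
-- what changed: B has no running up/down state flag at all: it filters out threshold-equal samples, then detects crossings by a purely local adjacent-pair criterion on the filtered sequence (a >1500 sample whose previous significant sample is <1500 or absent), and finally selects the nth by a guarded index.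
import Mathlib
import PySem

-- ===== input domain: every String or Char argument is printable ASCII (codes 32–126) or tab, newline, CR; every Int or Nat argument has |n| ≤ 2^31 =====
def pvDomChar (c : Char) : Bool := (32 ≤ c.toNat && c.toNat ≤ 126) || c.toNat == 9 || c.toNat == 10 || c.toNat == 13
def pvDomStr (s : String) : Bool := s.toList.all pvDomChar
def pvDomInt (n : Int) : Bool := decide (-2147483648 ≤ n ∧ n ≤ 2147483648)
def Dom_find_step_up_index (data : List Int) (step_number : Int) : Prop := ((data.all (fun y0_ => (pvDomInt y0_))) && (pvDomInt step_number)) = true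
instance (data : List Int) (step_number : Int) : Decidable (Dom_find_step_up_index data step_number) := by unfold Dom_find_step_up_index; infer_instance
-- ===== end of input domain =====

-- B drops the running up/down flag: it filters out threshold-equal samples and detects crossings by an adjacent-pair criterion on the filtered sequence, then selects the nth by a guarded index; same O(n) cost, different algorithmic idea.


-- ===== PORT A =====
-- A's loop: state (index, current_step_number, is_currently_up), break when the
-- crossing counter equals step_number.
def findStepLoopA (sn : Int) : List Int → Int → Int → Bool → Int
  | [], index, _, _ => index
  | v :: rest, index, cur, up =>
    if v > 1500 ∧ up = false then
      if cur = sn then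
        index
      else
        -- is_currently_up was set to True; the later `value < 1500` test follows
        findStepLoopA sn rest (index + 1) (cur + 1) (if v < 1500 then false else true)
    else
      findStepLoopA sn rest (index + 1) cur (if v < 1500 then false else up)

def find_step_up_index (data : List Int) (step_number : Int) : Int :=
  findStepLoopA step_number data 0 0 false

-- ===== PORT B =====
-- Source B's crossing criterion on a (prev, (i, v)) pair: v > 1500 and (p is None or p < 1500)
def crossCond (p : Option Int) (v : Int) : Bool :=
  decide (1500 < v) && (match p with | none => true | some x => decide (x < 1500))

-- Source B: sig = [(i, v) for i, v in enumerate(data) if v != 1500]  (start offset generalized)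
def sigOf (data : List Int) (s : Int) : List (Int × Int) :=
  (PySem.List.enumerate data s).filterMap (fun iv => if iv.2 ≠ 1500 then some iv else none)

-- Source B: prevs = [None] + [v for _, v in sig]; crossings = [i for p,(i,v) in zip(prevs, sig) if …]
def crossPipe (p : Option Int) (l : List (Int × Int)) : List Int :=
  ((p :: l.map (fun iv => some iv.2)).zip l).filterMap
    (fun piv => if crossCond piv.1 piv.2.2 then some piv.2.1 else none)

def find_step_up_index_alt (data : List Int) (step_number : Int) : Int :=
  let cs := crossPipe none (sigOf data 0)
  if 0 ≤ step_number ∧ step_number < (cs.length : Int) then cs.getD step_number.toNat 0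
  else (data.length : Int)

-- ===== PRECONDITION & SPEC =====
def Spec_find_step_up_index (data : List Int) (step_number : Int) (out : Int) : Prop := out = find_step_up_index_alt data step_number
instance (data : List Int) (step_number : Int) (out : Int) : Decidable (Spec_find_step_up_index data step_number out) := by unfold Spec_find_step_up_index; infer_instance

-- ===== CLAIM (what is proved, stated in full; the proofs are below) =====
def Claim_equal_find_step_up_index : Prop := ∀ (data : List Int) (step_number : Int), Dom_find_step_up_index data step_number → Spec_find_step_up_index data step_number (find_step_up_index data step_number)

-- ===== LEMMAS AND PROOFS =====

-- Proof-only helper: the crossing list A's state machine implicitly walks over,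
-- by explicit recursion on the data with the (index, up) state.
def findStepCrossings : List Int → Int → Bool → List Int
  | [], _, _ => []
  | v :: rest, i, up =>
    if v > 1500 ∧ up = false then
      i :: findStepCrossings rest (i + 1) true
    else
      findStepCrossings rest (i + 1) (if v < 1500 then false else up)

def isUp : Option Int → Bool
  | none => false
  | some x => decide (1500 < x)

theorem crossPipe_cons (p : Option Int) (i v : Int) (l : List (Int × Int)) :
    crossPipe p ((i, v) :: l) =
      (if crossCond p v then [i] else []) ++ crossPipe (some v) l := by
  cases h : crossCond p v <;>
    simp [crossPipe, List.zip_cons_cons, h]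

theorem sigOf_cons (v : Int) (rest : List Int) (s : Int) :
    sigOf (v :: rest) s =
      if v ≠ 1500 then (s, v) :: sigOf rest (s + 1) else sigOf rest (s + 1) := by
  simp only [sigOf, PySem.List.enumerate_cons, List.filterMap_cons]
  split <;> simp_all

-- The pipeline equals the state-machine crossing list, provided the pending
-- previous value is never exactly 1500 (such values are filtered out).
theorem crossPipe_eq_findStepCrossings :
    ∀ (data : List Int) (s : Int) (p : Option Int), (∀ x, p = some x → x ≠ 1500) →
      crossPipe p (sigOf data s) = findStepCrossings data s (isUp p) := by
  intro data
  induction data with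
  | nil => intro s p _; simp [sigOf, PySem.List.enumerate, crossPipe, findStepCrossings]
  | cons v rest ih =>
    intro s p hp
    rw [sigOf_cons]
    by_cases hv : v = 1500
    · rw [if_neg (by simp [hv])]
      rw [ih (s + 1) p hp]
      subst hv
      simp [findStepCrossings]
    · rw [if_pos (by simp [hv])]
      rw [crossPipe_cons, ih (s + 1) (some v) (fun x hx => by cases hx; exact hv)]
      simp only [findStepCrossings]
      by_cases h1 : 1500 < v
      · cases p with
        | none => simp [crossCond, h1, isUp]
        | some x =>
          have hx := hp x rfl
          by_cases h2 : 1500 < x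
          · have h3 : ¬ v < 1500 := by omega
            have h4 : ¬ x < 1500 := by omega
            simp [crossCond, isUp, h1, h2, h3, h4]
          · simp [crossCond, h1, isUp, h2, (by omega : x < 1500)]
      · have hvlt : v < 1500 := by omega
        simp [crossCond, h1, isUp, hvlt]

-- If the step counter has already passed step_number it can never match again.
theorem findStepLoopA_neg (sn : Int) :
    ∀ (rest : List Int) (idx cur : Int) (up : Bool), sn < cur →
      findStepLoopA sn rest idx cur up = idx + rest.length := by
  intro rest
  induction rest with
  | nil => intro idx cur up h; simp [findStepLoopA]
  | cons v rest ih =>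
    intro idx cur up h
    simp only [findStepLoopA]
    split
    · rw [if_neg (by omega)]
      rw [ih _ _ _ (by omega)]
      simp; omega
    · rw [ih _ _ _ h]
      simp; omega

-- Main invariant: A's loop from state (idx, cur, up) selects element (sn - cur)
-- of the crossing list of the remainder, or falls off the end.
theorem findStepLoopA_pos (sn : Int) :
    ∀ (rest : List Int) (idx cur : Int) (up : Bool), cur ≤ sn →
      findStepLoopA sn rest idx cur up =
        (if sn - cur < ((findStepCrossings rest idx up).length : Int) then
          (findStepCrossings rest idx up).getD (sn - cur).toNat 0
        else idx + rest.length) := by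
  intro rest
  induction rest with
  | nil =>
    intro idx cur up h
    simp only [findStepLoopA, findStepCrossings]
    rw [if_neg (by simp; omega)]
    simp
  | cons v rest ih =>
    intro idx cur up h
    simp only [findStepLoopA, findStepCrossings]
    split
    · rename_i hc
      by_cases hcs : cur = sn
      · rw [if_pos hcs]
        rw [if_pos (by simp; omega)]
        have : (sn - cur).toNat = 0 := by omega
        simp [this]
      · rw [if_neg hcs]
        have hlt : cur + 1 ≤ sn := by omega
        have hv : ¬ v < 1500 := by omega
        rw [if_neg hv]
        rw [ih (idx + 1) (cur + 1) true hlt]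
        have h1 : sn - cur ≥ 1 := by omega
        by_cases h2 : sn - (cur + 1) < ((findStepCrossings rest (idx + 1) true).length : Int)
        · rw [if_pos h2]
          rw [if_pos (by simp only [List.length_cons]; push_cast; omega)]
          have : (sn - cur).toNat = (sn - (cur + 1)).toNat + 1 := by omega
          simp [this]
        · rw [if_neg h2]
          rw [if_neg (by simp only [List.length_cons]; push_cast; omega)]
          simp; omega
    · rw [ih (idx + 1) cur _ h]
      split <;> · simp; try omega

theorem find_step_up_index_eq (data : List Int) (sn : Int) :
    find_step_up_index data sn = find_step_up_index_alt data sn := by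
  unfold find_step_up_index find_step_up_index_alt
  rw [crossPipe_eq_findStepCrossings data 0 none (fun x hx => by cases hx)]
  simp only [isUp]
  by_cases h : 0 ≤ sn
  · rw [findStepLoopA_pos sn data 0 0 false h]
    simp only [sub_zero, zero_add]
    by_cases h2 : sn < ((findStepCrossings data 0 false).length : Int)
    · rw [if_pos h2, if_pos ⟨h, h2⟩]
    · rw [if_neg h2, if_neg (by tauto)]
  · rw [findStepLoopA_neg sn data 0 0 false (by omega)]
    rw [if_neg (by omega)]
    simp

-- ===== VERDICT (by name: the statement is the Claim_ definition above) =====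
theorem find_step_up_index_spec : Claim_equal_find_step_up_index := by
  intro data sn _
  exact find_step_up_index_eq data sn
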